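-- pv_equiv track=rewrite | github.com/dimamik/AGH_Algorithms_and_data_structures | KOLOKWIA_2020/K_1/Zad_1.py | Wielo_Jedno_Krotne
-- ===== SOURCE A (Python) =====
-- def Wielo_Jedno_Krotne(number):
--     """
--     Zmodyfikowany Counting Sort
--      """
--     if number == 0:
--         """
--         Obsugujemy edge case oddzielnie,
--         bo 0 to JednoKrotne
--          """
--         return [0, 1, 0]
--     tab_of_digits = [0] * 10
--     to_ret = number
--     """
--     Zbieram cyfry liczby
--      """
--     while number > 0:
--         tab_of_digits[number % 10] += 1
--         number = number // 10
--
--     Wielo_Krotne = 0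
--     Jedno_Krotne = 0
--     for i in tab_of_digits:
--         if i == 1:
--             Jedno_Krotne += 1
--         elif i > 1:
--             Wielo_Krotne += 1
--     return [to_ret, Jedno_Krotne, Wielo_Krotne]
-- ===== SOURCE B (Python) =====
-- def Wielo_Jedno_Krotne(number):
--     if number == 0:
--         return [0, 1, 0]
--     digits = []
--     n = number
--     while n > 0:
--         digits.append(n % 10)
--         n //= 10
--     digits.sort()
--     Jedno_Krotne = 0
--     Wielo_Krotne = 0
--     i = 0
--     while i < len(digits):
--         j = i + 1
--         while j < len(digits) and digits[j] == digits[i]: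
--             j += 1
--         if j - i == 1:
--             Jedno_Krotne += 1
--         else:
--             Wielo_Krotne += 1
--         i = j
--     return [number, Jedno_Krotne, Wielo_Krotne]
-- ===== Notes on version B (the rewrite author's own statement) =====
-- stated objective: alternative
-- what changed: Replaces A's fixed ten-slot counting tally plus a histogram pass with sort-and-scan: the digits are collected into a list, sorted, and a run-length scan over consecutive equal digits counts single-element runs as unique and longer runs as repeated.
import Mathlib
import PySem

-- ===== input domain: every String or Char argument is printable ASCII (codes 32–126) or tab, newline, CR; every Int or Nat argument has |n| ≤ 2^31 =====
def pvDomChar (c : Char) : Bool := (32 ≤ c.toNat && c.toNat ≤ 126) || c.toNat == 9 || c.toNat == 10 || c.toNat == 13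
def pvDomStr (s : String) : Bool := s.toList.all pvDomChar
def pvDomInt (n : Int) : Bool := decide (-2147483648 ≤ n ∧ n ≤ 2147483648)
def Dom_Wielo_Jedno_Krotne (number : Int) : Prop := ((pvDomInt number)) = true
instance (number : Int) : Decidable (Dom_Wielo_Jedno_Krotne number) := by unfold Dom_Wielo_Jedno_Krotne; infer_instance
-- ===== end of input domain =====

-- B replaces A's fixed ten-slot counting tally and its histogram pass with sort-and-scan:
-- collect the digits into a list, sort it, and count runs of consecutive equal digits
-- (length-1 runs are unique digits, longer runs repeated ones). Objective: alternative.

-- ===== PORT A =====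
-- the 'while number > 0' tally loop of A
def pvALoop (n : Int) (tab : List Int) : List Int :=
  if h : 0 < n then
    pvALoop (PySem.Int.floordiv n 10)
      (PySem.List.pySetD tab (PySem.Int.mod n 10)
        (PySem.List.pyGetD tab (PySem.Int.mod n 10) 0 + 1))
  else tab
termination_by n.toNat
decreasing_by
  rw [PySem.Int.floordiv_eq_ediv_of_pos (by norm_num : (0:Int) < 10)]
  omega

-- the 'for i in tab_of_digits' counting loop of A; state = (Wielo_Krotne, Jedno_Krotne)
def pvACount : List Int → Int × Int → Int × Int
  | [], s => s
  | i :: rest, (w, j) =>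
    if i = 1 then pvACount rest (w, j + 1)
    else if 1 < i then pvACount rest (w + 1, j)
    else pvACount rest (w, j)

def Wielo_Jedno_Krotne (number : Int) : List Int :=
  if number = 0 then [0, 1, 0]
  else
    let tab := pvALoop number (List.replicate 10 0)
    let wj := pvACount tab (0, 0)
    [number, wj.2, wj.1]

-- ===== PORT B =====
-- B's digit-collection loop: 'while n > 0: digits.append(n % 10); n //= 10'
def pvDigits (n : Int) : List Int :=
  if h : 0 < n then
    PySem.Int.mod n 10 :: pvDigits (PySem.Int.floordiv n 10)
  else []
termination_by n.toNat
decreasing_by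
  rw [PySem.Int.floordiv_eq_ediv_of_pos (by norm_num : (0:Int) < 10)]
  omega

-- B's run scan over the sorted digit list: the outer 'while i < len(digits)' loop;
-- the inner 'while j < len and digits[j] == digits[i]' advance is the takeWhile/dropWhile split
def pvBScan : List Int → Int × Int
  | [] => (0, 0)
  | d :: rest =>
    let run := rest.takeWhile (fun x => x == d)
    let p := pvBScan (rest.dropWhile (fun x => x == d))
    if run.length = 0 then (p.1 + 1, p.2) else (p.1, p.2 + 1)
termination_by l => l.length
decreasing_by
  have := List.length_dropWhile_le (fun x => x == d) rest
  simp only [List.length_cons]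
  omega

def Wielo_Jedno_Krotne_alt (number : Int) : List Int :=
  if number = 0 then [0, 1, 0]
  else
    let digits := PySem.List.sorted (pvDigits number) (fun x => x) false
    let jw := pvBScan digits
    [number, jw.1, jw.2]

-- ===== PRECONDITION & SPEC =====
def Spec_Wielo_Jedno_Krotne (number : Int) (out : List Int) : Prop := out = Wielo_Jedno_Krotne_alt number
instance (number : Int) (out : List Int) : Decidable (Spec_Wielo_Jedno_Krotne number out) := by unfold Spec_Wielo_Jedno_Krotne; infer_instance

-- ===== CLAIM (what is proved, stated in full; the proofs are below) =====
def Claim_equal_Wielo_Jedno_Krotne : Prop := ∀ (number : Int), Dom_Wielo_Jedno_Krotne number → Spec_Wielo_Jedno_Krotne number (Wielo_Jedno_Krotne number)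

-- ===== LEMMAS AND PROOFS =====

-- A's count loop counts the tab entries equal to 1 and greater than 1
theorem pvACount_eq (l : List Int) (w j : Int) :
    pvACount l (w, j) =
      (w + (l.countP (fun x => decide (1 < x)) : Int),
       j + (l.countP (fun x => decide (x = 1)) : Int)) := by
  induction l generalizing w j with
  | nil => simp [pvACount]
  | cons i rest ih =>
    simp only [pvACount, List.countP_cons]
    by_cases h1 : i = 1
    · simp [h1, ih]; omega
    · by_cases h2 : 1 < i
      · simp [h1, h2, ih]; omega
      · simp [h1, h2, ih]

theorem pvCountP_eq_range (l : List Int) (p : Int → Bool) :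
    l.countP p = ((List.range l.length).filter (fun i => p (l.getD i 0))).length := by
  induction l with
  | nil => simp
  | cons a t ih =>
    rw [List.length_cons, List.range_succ_eq_map, List.countP_cons]
    simp only [List.filter_cons, List.filter_map, List.getD_cons_zero]
    by_cases hp : p a
    · simp [hp, Function.comp_def, ih, Nat.add_comm]
    · simp [hp, Function.comp_def, ih]

-- a nodup list of ints drawn from [0,10) whose membership is characterised by Q
-- has as many elements as range 10 has indices satisfying Q
theorem pvListLen (s : List Int) (Q : Nat → Prop) [DecidablePred Q]
    (hnd : s.Nodup) (hb : ∀ x ∈ s, ∃ i : Nat, i < 10 ∧ x = (i : Int))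
    (hm : ∀ i : Nat, i < 10 → ((i : Int) ∈ s ↔ Q i)) :
    s.length = ((List.range 10).filter (fun i => decide (Q i))).length := by
  have hinj : Function.Injective (fun i : Nat => (i : Int)) := fun a b h => by
    simpa using h
  have hperm : s.Perm (((List.range 10).filter (fun i => decide (Q i))).map (fun i : Nat => (i : Int))) := by
    rw [List.perm_ext_iff_of_nodup hnd (((List.nodup_range).filter _).map hinj)]
    intro a
    constructor
    · intro ha
      obtain ⟨i, hi, rfl⟩ := hb a ha
      exact List.mem_map.2 ⟨i, List.mem_filter.2 ⟨List.mem_range.2 hi, by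
        simpa using (hm i hi).1 ha⟩, rfl⟩
    · intro ha
      obtain ⟨i, hif, rfl⟩ := List.mem_map.1 ha
      obtain ⟨hir, hq⟩ := List.mem_filter.1 hif
      exact (hm i (List.mem_range.1 hir)).2 (by simpa using hq)
  simpa using hperm.length_eq

-- every digit produced by the extraction loop lies in [0,10)
theorem pvDigits_mem (n : Int) : ∀ x ∈ pvDigits n, ∃ i : Nat, i < 10 ∧ x = (i : Int) := by
  rw [pvDigits]
  by_cases h : 0 < n
  · simp only [dif_pos h, List.mem_cons]
    rintro x (rfl | hx)
    · have hmod : PySem.Int.mod n 10 = n % 10 :=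
        PySem.Int.mod_eq_emod_of_pos (by norm_num)
      refine ⟨(n % 10).toNat, by omega, by rw [hmod]; omega⟩
    · exact pvDigits_mem _ x hx
  · simp [dif_neg h]
termination_by n.toNat
decreasing_by
  rw [PySem.Int.floordiv_eq_ediv_of_pos (by norm_num : (0:Int) < 10)]
  omega

-- A's tally is the digit-count histogram of B's digit list
theorem pvALoop_getD_aux (k : Nat) : ∀ (n : Int), n.toNat ≤ k →
    ∀ tab : List Int, tab.length = 10 →
      (pvALoop n tab).length = 10 ∧
      ∀ i : Nat, i < 10 →
        (pvALoop n tab).getD i 0 = tab.getD i 0 + ((pvDigits n).count (i : Int) : Int) := by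
  induction k with
  | zero =>
    intro n hn tab hlen
    have hnp : ¬ 0 < n := by omega
    rw [pvALoop, pvDigits]
    simp [dif_neg hnp, hlen]
  | succ k ih =>
    intro n hn tab hlen
    by_cases hp : 0 < n
    · rw [pvALoop, pvDigits]
      simp only [dif_pos hp]
      have hmod : PySem.Int.mod n 10 = n % 10 :=
        PySem.Int.mod_eq_emod_of_pos (by norm_num)
      have hd0 : 0 ≤ PySem.Int.mod n 10 := by rw [hmod]; omega
      have hd10 : PySem.Int.mod n 10 < 10 := by rw [hmod]; omega
      set d : Int := PySem.Int.mod n 10 with hd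
      have hn' : (PySem.Int.floordiv n 10).toNat ≤ k := by
        rw [PySem.Int.floordiv_eq_ediv_of_pos (by norm_num : (0:Int) < 10)]
        omega
      have hdlen : d.toNat < tab.length := by omega
      have hset : PySem.List.pySetD tab d (PySem.List.pyGetD tab d 0 + 1)
          = tab.set d.toNat (tab.getD d.toNat 0 + 1) := by
        rw [PySem.List.pySetD_of_nonneg tab _ hd0,
            PySem.List.pyGetD_eq_getElem tab 0 hd0 (by omega),
            List.getD_eq_getElem _ _ hdlen]
      rw [hset]
      have hlen' : (tab.set d.toNat (tab.getD d.toNat 0 + 1)).length = 10 := by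
        simp [hlen]
      obtain ⟨hl, hrec⟩ := ih (PySem.Int.floordiv n 10) hn' _ hlen'
      refine ⟨hl, ?_⟩
      intro i hi
      rw [hrec i hi]
      have hget : (tab.set d.toNat (tab.getD d.toNat 0 + 1)).getD i 0
          = if i = d.toNat then tab.getD i 0 + 1 else tab.getD i 0 := by
        simp only [List.getD, List.getElem?_set]
        split_ifs with h1 h2 h2
        · subst h1; simp [List.getElem?_eq_getElem hdlen]
        · omega
        · omega
        · rfl
      rw [hget, List.count_cons]
      by_cases hid : i = d.toNat
      · subst hid
        have hbe : (d == ((d.toNat : Nat) : Int)) = true := by simp; omega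
        simp only [if_pos rfl, hbe, if_true]
        push_cast
        omega
      · have hbe : (d == (i : Int)) = false := by simp; omega
        simp [hbe, hid]
    · rw [pvALoop, pvDigits]
      simp [dif_neg hp, hlen]

theorem pvALoop_getD (n : Int) (tab : List Int) (hlen : tab.length = 10) :
    (pvALoop n tab).length = 10 ∧
    ∀ i : Nat, i < 10 →
      (pvALoop n tab).getD i 0 = tab.getD i 0 + ((pvDigits n).count (i : Int) : Int) :=
  pvALoop_getD_aux n.toNat n le_rfl tab hlen

-- the run scan over a sorted list counts the distinct values with count 1 / count ≥ 2
theorem pvBScan_eq_aux (k : Nat) : ∀ l : List Int, l.length ≤ k →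
    l.Pairwise (· ≤ ·) →
    ∃ s : List Int, s.Nodup ∧ (∀ x, x ∈ s ↔ x ∈ l) ∧
      pvBScan l = (((s.filter (fun v => decide (l.count v = 1))).length : Int),
                   ((s.filter (fun v => decide (2 ≤ l.count v))).length : Int)) := by
  induction k with
  | zero =>
    intro l hl _
    have : l = [] := List.length_eq_zero_iff.1 (by omega)
    subst this
    exact ⟨[], by simp, by simp, by simp [pvBScan]⟩
  | succ k ih =>
    intro l hl hs
    match l, hs with
    | [], _ => exact ⟨[], by simp, by simp, by simp [pvBScan]⟩
    | d :: rest, hs =>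
      have hsrest : rest.Pairwise (· ≤ ·) := (List.pairwise_cons.1 hs).2
      have hdle : ∀ x ∈ rest, d ≤ x := (List.pairwise_cons.1 hs).1
      set kk := rest.takeWhile (fun x => x == d) with hkk
      set r := rest.dropWhile (fun x => x == d) with hr
      have hsplit : kk ++ r = rest := List.takeWhile_append_dropWhile
      have hkd : ∀ x ∈ kk, x = d := by
        intro x hx
        have := List.mem_takeWhile_imp hx
        simpa using this
      have hsr : r.Pairwise (· ≤ ·) :=
        List.Pairwise.sublist (List.dropWhile_sublist _) hsrest
      -- d does not occur in r
      have hdr : d ∉ r := by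
        intro hmem
        obtain ⟨e, r', he⟩ := List.exists_cons_of_ne_nil (List.ne_nil_of_mem hmem)
        have hw : rest.dropWhile (fun x => x == d) ≠ [] := by
          rw [← hr, he]; simp
        have hne : (e == d) = false := by
          have h1 := List.head_dropWhile_not (fun x => x == d) hw
          have h2 : (rest.dropWhile (fun x => x == d)).head hw = e := by
            simp [← hr, he]
          rwa [h2] at h1
        have hed : e ≠ d := by simpa using hne
        have hrle : ∀ x ∈ r', e ≤ x := by
          rw [he] at hsr
          exact (List.pairwise_cons.1 hsr).1
        have hde : d ≤ e := hdle e (by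
          rw [← hsplit, he]; simp)
        rw [he] at hmem
        rcases List.mem_cons.1 hmem with h | h
        · exact hed h.symm
        · exact hed (le_antisymm (hrle d h) hde)
      have hrlen : r.length ≤ k := by
        have h1 : kk.length + r.length = rest.length := by
          rw [← List.length_append, hsplit]
        have h2 : rest.length + 1 ≤ k + 1 := by simpa using hl
        omega
      obtain ⟨s', hnd', hmem', hscan'⟩ := ih r hrlen hsr
      -- counts in l = d :: rest
      have hcount_d : (d :: rest).count d = 1 + kk.length := by
        have h1 : kk.count d = kk.length := by
          apply List.count_eq_length.2
          intro x hx
          simp [hkd x hx]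
        have h2 : r.count d = 0 := List.count_eq_zero.2 hdr
        rw [← hsplit, List.count_cons]
        simp [List.count_append, h1, h2]
        omega
      have hcount_ne : ∀ v : Int, v ≠ d → (d :: rest).count v = r.count v := by
        intro v hv
        rw [← hsplit, List.count_cons]
        simp only [List.count_append]
        have h1 : kk.count v = 0 := List.count_eq_zero.2 (fun hx => hv (hkd v hx))
        have h2 : (d == v) = false := by simpa using (fun h => hv h.symm)
        simp [h1, h2]
      have hds' : d ∉ s' := fun h => hdr ((hmem' d).1 h)
      refine ⟨d :: s', List.nodup_cons.2 ⟨hds', hnd'⟩, ?_, ?_⟩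
      · intro x
        simp only [List.mem_cons, hmem' x]
        constructor
        · rintro (rfl | h)
          · exact Or.inl rfl
          · exact Or.inr (by rw [← hsplit]; exact List.mem_append_right _ h)
        · rintro (rfl | h)
          · exact Or.inl rfl
          · rw [← hsplit] at h
            rcases List.mem_append.1 h with h | h
            · exact Or.inl (hkd x h)
            · exact Or.inr h
      · -- unfold one step of the scan
        have hstep : pvBScan (d :: rest) =
            if kk.length = 0 then ((pvBScan r).1 + 1, (pvBScan r).2)
            else ((pvBScan r).1, (pvBScan r).2 + 1) := by
          rw [pvBScan]
        rw [hstep, hscan']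
        have hfilter1 : s'.filter (fun v => decide ((d :: rest).count v = 1))
            = s'.filter (fun v => decide (r.count v = 1)) := by
          apply List.filter_congr
          intro v hv
          have hvne : v ≠ d := fun h => hds' (h ▸ hv)
          rw [hcount_ne v hvne]
        have hfilter2 : s'.filter (fun v => decide (2 ≤ (d :: rest).count v))
            = s'.filter (fun v => decide (2 ≤ r.count v)) := by
          apply List.filter_congr
          intro v hv
          have hvne : v ≠ d := fun h => hds' (h ▸ hv)
          rw [hcount_ne v hvne]
        by_cases hk0 : kk.length = 0
        · have hf1 : (d :: s').filter (fun v => decide ((d :: rest).count v = 1))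
              = d :: s'.filter (fun v => decide (r.count v = 1)) := by
            rw [List.filter_cons, if_pos (by simp [hcount_d, hk0]), hfilter1]
          have hf2 : (d :: s').filter (fun v => decide (2 ≤ (d :: rest).count v))
              = s'.filter (fun v => decide (2 ≤ r.count v)) := by
            rw [List.filter_cons, if_neg (by simp [hcount_d, hk0]), hfilter2]
          rw [if_pos hk0, hf1, hf2, List.length_cons]
          simp only [Prod.mk.injEq]
          constructor <;> push_cast <;> ring
        · have hf1 : (d :: s').filter (fun v => decide ((d :: rest).count v = 1))
              = s'.filter (fun v => decide (r.count v = 1)) := by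
            rw [List.filter_cons, if_neg (by simp only [decide_eq_true_eq, hcount_d]; omega), hfilter1]
          have hf2 : (d :: s').filter (fun v => decide (2 ≤ (d :: rest).count v))
              = d :: s'.filter (fun v => decide (2 ≤ r.count v)) := by
            rw [List.filter_cons, if_pos (by simp only [decide_eq_true_eq, hcount_d]; omega), hfilter2]
          rw [if_neg hk0, hf1, hf2, List.length_cons]
          simp only [Prod.mk.injEq]
          constructor <;> push_cast <;> ring

theorem pvBScan_eq (l : List Int) (hs : l.Pairwise (· ≤ ·)) :
    ∃ s : List Int, s.Nodup ∧ (∀ x, x ∈ s ↔ x ∈ l) ∧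
      pvBScan l = (((s.filter (fun v => decide (l.count v = 1))).length : Int),
                   ((s.filter (fun v => decide (2 ≤ l.count v))).length : Int)) :=
  pvBScan_eq_aux l.length l le_rfl hs

-- ===== VERDICT (by name: the statement is the Claim_ definition above) =====
theorem Wielo_Jedno_Krotne_spec : Claim_equal_Wielo_Jedno_Krotne := by
  intro number _
  unfold Spec_Wielo_Jedno_Krotne Wielo_Jedno_Krotne Wielo_Jedno_Krotne_alt
  by_cases h0 : number = 0
  · simp [h0]
  · simp only [h0, if_false]
    have hperm : (PySem.List.sorted (pvDigits number) (fun x => x) false).Perm (pvDigits number) :=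
      PySem.List.sorted_perm (pvDigits number) (fun x => x) false
    have hcnt : ∀ v : Int,
        (PySem.List.sorted (pvDigits number) (fun x => x) false).count v = (pvDigits number).count v :=
      fun v => hperm.count_eq v
    have hpw : (PySem.List.sorted (pvDigits number) (fun x => x) false).Pairwise (· ≤ ·) :=
      PySem.List.sorted_pairwise (pvDigits number) (fun x => x)
    have hmemS : ∀ x ∈ PySem.List.sorted (pvDigits number) (fun x => x) false,
        ∃ i : Nat, i < 10 ∧ x = (i : Int) := by
      intro x hx
      exact pvDigits_mem number x (hperm.mem_iff.1 hx)
    -- A side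
    obtain ⟨hlen, htab⟩ := pvALoop_getD number (List.replicate 10 0) (by simp)
    have htab' : ∀ i : Nat, i < 10 →
        (pvALoop number (List.replicate 10 0)).getD i 0 = ((pvDigits number).count (i : Int) : Int) := by
      intro i hi
      rw [htab i hi]
      have : (List.replicate 10 (0 : Int)).getD i 0 = 0 := by
        rw [List.getD_eq_getElem _ _ (by simp; omega)]
        exact List.getElem_replicate _
      rw [this, zero_add]
    rw [pvACount_eq, pvCountP_eq_range, pvCountP_eq_range, hlen]
    -- B side
    obtain ⟨s, hnd, hmem, hscan⟩ := pvBScan_eq (PySem.List.sorted (pvDigits number) (fun x => x) false) hpw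
    rw [hscan]
    -- jedno
    have hJ : ((s.filter (fun v => decide ((PySem.List.sorted (pvDigits number) (fun x => x) false).count v = 1))).length)
        = ((List.range 10).filter (fun i => decide ((pvALoop number (List.replicate 10 0)).getD i 0 = 1))).length := by
      rw [pvListLen _ (fun i => (pvALoop number (List.replicate 10 0)).getD i 0 = 1)
            (hnd.filter _)
            (fun x hx => hmemS x ((hmem x).1 (List.mem_filter.1 hx).1))]
      intro i hi
      rw [List.mem_filter, hmem, htab' i hi]
      constructor
      · rintro ⟨_, hp⟩
        have hp' : (pvDigits number).count (i : Int) = 1 := by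
          rw [← hcnt]; simpa using hp
        exact_mod_cast hp'
      · intro h
        have h1 : (pvDigits number).count (i : Int) = 1 := by exact_mod_cast h
        have h2 : (PySem.List.sorted (pvDigits number) (fun x => x) false).count (i : Int) = 1 := by
          rw [hcnt]; exact h1
        exact ⟨List.count_pos_iff.1 (by omega), by simpa using h2⟩
    -- wielo
    have hW : ((s.filter (fun v => decide (2 ≤ (PySem.List.sorted (pvDigits number) (fun x => x) false).count v))).length)
        = ((List.range 10).filter (fun i => decide (1 < (pvALoop number (List.replicate 10 0)).getD i 0))).length := by
      rw [pvListLen _ (fun i => 1 < (pvALoop number (List.replicate 10 0)).getD i 0)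
            (hnd.filter _)
            (fun x hx => hmemS x ((hmem x).1 (List.mem_filter.1 hx).1))]
      intro i hi
      rw [List.mem_filter, hmem, htab' i hi]
      constructor
      · rintro ⟨_, hp⟩
        have hp' : 2 ≤ (pvDigits number).count (i : Int) := by
          rw [← hcnt]; simpa using hp
        have : (2 : Int) ≤ ((pvDigits number).count (i : Int) : Int) := by exact_mod_cast hp'
        omega
      · intro h
        have h1 : 2 ≤ (pvDigits number).count (i : Int) := by
          have : (1 : Int) < ((pvDigits number).count (i : Int) : Int) := h
          omega
        have h2 : 2 ≤ (PySem.List.sorted (pvDigits number) (fun x => x) false).count (i : Int) := by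
          rw [hcnt]; exact h1
        exact ⟨List.count_pos_iff.1 (by omega), by simpa using h2⟩
    simp [hJ, hW]
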